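-- pv_equiv track=rewrite | github.com/LarsHolen/PythonCourses2021 | inf620/examen.py | sensurer
-- ===== SOURCE A (Python) =====
-- def sensurer(streng, tabu):
--     resultatStreng = ""
--     for i in streng:
--         if tabu.find(i) != -1:
--             resultatStreng += "*"
--         else:
--             resultatStreng += i
--     return resultatStreng
-- ===== SOURCE B (Python) =====
-- def sensurer(streng, tabu):
--     for c in tabu:
--         streng = streng.replace(c, "*")
--     return streng
-- ===== Notes on version B (the rewrite author's own statement) =====
-- stated objective: idiomatic
-- what changed: Instead of scanning streng once and testing each character against tabu, B loops over tabu and performs one whole-string str.replace pass per censored character, so no per-character membership test or branch exists.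
import Mathlib
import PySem

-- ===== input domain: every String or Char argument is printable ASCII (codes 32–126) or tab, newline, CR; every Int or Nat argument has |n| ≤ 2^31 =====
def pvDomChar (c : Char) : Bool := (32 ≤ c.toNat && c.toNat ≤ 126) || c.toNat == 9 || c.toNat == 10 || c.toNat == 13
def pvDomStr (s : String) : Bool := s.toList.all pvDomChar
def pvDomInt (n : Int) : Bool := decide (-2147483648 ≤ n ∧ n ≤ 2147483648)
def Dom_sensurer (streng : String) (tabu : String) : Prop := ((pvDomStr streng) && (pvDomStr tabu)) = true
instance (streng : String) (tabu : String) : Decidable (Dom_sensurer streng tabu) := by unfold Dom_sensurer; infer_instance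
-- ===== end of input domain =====

-- B loops over tabu, doing one whole-string str.replace pass per censored
-- character, instead of A's single scan of streng with a per-character
-- membership test; objective: idiomatic.


-- ===== PORT A =====
-- loop over the characters of streng, appending "*" when tabu.find(i) != -1, else the character
def sensurer (streng : String) (tabu : String) : String :=
  String.ofList (streng.toList.foldl
    (fun acc c =>
      if PySem.Chars.find tabu.toList [c] ≠ -1 then acc ++ ['*'] else acc ++ [c])
    [])

-- ===== PORT B =====
-- for c in tabu: streng = streng.replace(c, "*"); return streng
def sensurer_alt (streng : String) (tabu : String) : String :=
  tabu.toList.foldl (fun s c => PySem.Str.replace s (String.ofList [c]) "*") streng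

-- ===== PRECONDITION & SPEC =====
def Spec_sensurer (streng : String) (tabu : String) (out : String) : Prop := out = sensurer_alt streng tabu
instance (streng : String) (tabu : String) (out : String) : Decidable (Spec_sensurer streng tabu out) := by unfold Spec_sensurer; infer_instance

-- ===== CLAIM =====
def Claim_equal_sensurer : Prop := ∀ (streng : String) (tabu : String), Dom_sensurer streng tabu → Spec_sensurer streng tabu (sensurer streng tabu)

-- ===== LEMMAS AND PROOFS =====

theorem pv_singleton_infix_iff (c : Char) (l : List Char) : [c] <:+: l ↔ c ∈ l := by
  constructor
  · intro h; exact h.mem (by simp)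
  · intro h; obtain ⟨a, b, rfl⟩ := List.mem_iff_append.mp h
    exact ⟨a, b, by simp⟩

-- replace.go with a single-character pattern is a map
theorem pv_go_single (c : Char) (l : List Char) (fuel : Nat) (acc : List Char)
    (h : l.length ≤ fuel) :
    PySem.Chars.replace.go [c] ['*'] fuel l acc
      = acc.reverse ++ l.map (fun x => if x = c then '*' else x) := by
  induction l generalizing fuel acc with
  | nil => cases fuel <;> simp [PySem.Chars.replace.go]
  | cons x t ih =>
    cases fuel with
    | zero => simp at h
    | succ n =>
      simp only [List.length_cons, Nat.succ_le_succ_iff] at h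
      rw [PySem.Chars.replace.go]
      by_cases hx : x = c
      · have hp : List.isPrefixOf [c] (x :: t) = true := by
          simp [List.isPrefixOf, hx]
        simp [hx, ih _ _ h]
      · have hp : List.isPrefixOf [c] (x :: t) = false := by
          simp [List.isPrefixOf]; exact fun h' => hx h'.symm
        simp [hp, hx, ih _ _ h]

theorem pv_replace_single (c : Char) (l : List Char) :
    PySem.Chars.replace l [c] ['*'] = l.map (fun x => if x = c then '*' else x) := by
  rw [PySem.Chars.replace]
  simp [pv_go_single c l l.length [] le_rfl]

-- folding all of tabu's substitutions over one character censors it iff it is in tabu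
theorem pv_charFold (ts : List Char) (x : Char) :
    ts.foldl (fun y c => if y = c then '*' else y) x
      = if x ∈ ts then '*' else x := by
  induction ts generalizing x with
  | nil => simp
  | cons c t ih =>
    by_cases hx : x = c
    · subst hx
      simp only [List.foldl_cons, List.mem_cons, true_or, if_true, ih]
      split <;> rfl
    · simp [List.foldl_cons, hx, ih]

-- B's loop over tabu, read character-wise
theorem pv_loopB (ts : List Char) (s : String) :
    (ts.foldl (fun s c => PySem.Str.replace s (String.ofList [c]) "*") s).toList
      = s.toList.map (fun x => ts.foldl (fun y c => if y = c then '*' else y) x) := by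
  induction ts generalizing s with
  | nil => simp
  | cons c t ih =>
    simp only [List.foldl_cons, ih, PySem.Str.toList_replace]
    have : (String.ofList [c]).toList = [c] := by simp
    rw [this]
    have : ("*" : String).toList = ['*'] := rfl
    rw [this, pv_replace_single, List.map_map]
    rfl

-- A's loop, flushed: foldl with append = acc ++ per-character censoring
theorem pv_loopA (tabu : String) (l : List Char) (acc : List Char) :
    (l.foldl
      (fun acc c =>
        if PySem.Chars.find tabu.toList [c] ≠ -1 then acc ++ ['*'] else acc ++ [c]) acc)
      = acc ++ l.map (fun c => if c ∈ tabu.toList then '*' else c) := by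
  induction l generalizing acc with
  | nil => simp
  | cons c t ih =>
    simp only [List.foldl_cons, List.map_cons, ih]
    by_cases h : c ∈ tabu.toList
    · have hf : PySem.Chars.find tabu.toList [c] ≠ -1 :=
        (PySem.Chars.find_ne_neg_one_iff _ _).mpr ((pv_singleton_infix_iff c _).mpr h)
      simp [hf, h]
    · have hf : PySem.Chars.find tabu.toList [c] = -1 :=
        (PySem.Chars.find_eq_neg_one_iff _ _).mpr (fun hc => h ((pv_singleton_infix_iff c _).mp hc))
      simp [hf, h]

-- ===== VERDICT =====
theorem sensurer_spec : Claim_equal_sensurer := by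
  intro streng tabu _
  unfold Spec_sensurer sensurer sensurer_alt
  apply String.ext  -- compare toList
  rw [pv_loopA]
  simp only [List.nil_append]
  rw [pv_loopB]
  have : (String.ofList (streng.toList.map (fun c => if c ∈ tabu.toList then '*' else c))).toList
      = streng.toList.map (fun c => if c ∈ tabu.toList then '*' else c) := by simp
  rw [this]
  exact List.map_congr_left (fun x _ => (pv_charFold tabu.toList x).symm)
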